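-- pv_equiv track=rewrite | github.com/oganesyankarina/GB_Python | Урок4_Полезные_инструменты/Задание6.py | my_iterator_2
-- ===== SOURCE A (Python) =====
-- from itertools import count, cycle
--
-- def my_iterator_2(list_, num):
--     result = []
--     i = 0
--     for item in cycle(list_):
--         if i > num:
--             break
--         result.append(item)
--         i += 1
--     return result
-- ===== SOURCE B (Python) =====
-- def my_iterator_2(list_, num):
--     n = num + 1
--     if n <= 0 or not list_:
--         return []
--     q, r = divmod(n, len(list_))
--     return list_ * q + list_[:r]
-- ===== Notes on version B (the rewrite author's own statement) =====
-- stated objective: faster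
-- what changed: Replaces the element-by-element append loop over itertools.cycle with arithmetic: divmod(num+1, len(list_)) gives full-block replication list_*q plus a partial slice list_[:r], with the empty-list and num<0 cases guarded up front.
import Mathlib
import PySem

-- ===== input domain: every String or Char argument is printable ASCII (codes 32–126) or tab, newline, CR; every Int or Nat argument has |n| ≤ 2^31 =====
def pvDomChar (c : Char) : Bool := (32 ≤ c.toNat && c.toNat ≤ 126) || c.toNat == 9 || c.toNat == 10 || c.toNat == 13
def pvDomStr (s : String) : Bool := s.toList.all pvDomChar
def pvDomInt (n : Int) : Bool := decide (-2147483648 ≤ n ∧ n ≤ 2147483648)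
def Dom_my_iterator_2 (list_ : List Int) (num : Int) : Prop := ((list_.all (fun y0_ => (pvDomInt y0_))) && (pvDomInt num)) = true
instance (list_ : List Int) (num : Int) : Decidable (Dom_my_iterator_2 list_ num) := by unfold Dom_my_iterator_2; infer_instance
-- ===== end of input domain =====

-- B replaces A's per-element append loop over itertools.cycle by divmod arithmetic:
-- whole-list replication plus a partial slice. Equivalence of return values is proved on all inputs.

-- ===== PORT A =====
-- The `for item in cycle(list_)` loop: the loop body runs exactly (num+1).toNat times
-- (i counts 0,1,…; it breaks as soon as i > num, before appending), each iteration
-- appending the next element of the cycle; `rest` is the unconsumed tail of the current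
-- pass, restarting from `orig` when exhausted (cycle([]) yields nothing: return acc).
def myIt2Go (orig : List Int) : List Int → Nat → List Int → List Int
  | _, 0, acc => acc
  | [], fuel+1, acc =>
      match orig with
      | [] => acc
      | h :: t => myIt2Go orig t fuel (acc ++ [h])
  | h :: t, fuel+1, acc => myIt2Go orig t fuel (acc ++ [h])

def my_iterator_2 (list_ : List Int) (num : Int) : List Int :=
  myIt2Go list_ list_ (num + 1).toNat []

-- ===== PORT B =====
def my_iterator_2_alt (list_ : List Int) (num : Int) : List Int :=
  let n := num + 1
  if n ≤ 0 ∨ list_ = [] then []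
  else
    let q := PySem.Int.floordiv n (list_.length : Int)
    let r := PySem.Int.mod n (list_.length : Int)
    (List.replicate q.toNat list_).flatten ++ PySem.List.slice list_ none (some r)

-- ===== PRECONDITION & SPEC =====
def Spec_my_iterator_2 (list_ : List Int) (num : Int) (out : List Int) : Prop := out = my_iterator_2_alt list_ num
instance (list_ : List Int) (num : Int) (out : List Int) : Decidable (Spec_my_iterator_2 list_ num out) := by unfold Spec_my_iterator_2; infer_instance

-- ===== CLAIM (what is proved, stated in full; the proofs are below) =====
def Claim_equal_my_iterator_2 : Prop := ∀ (list_ : List Int) (num : Int), Dom_my_iterator_2 list_ num → Spec_my_iterator_2 list_ num (my_iterator_2 list_ num)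

-- ===== LEMMAS AND PROOFS =====

-- wrapping on an exhausted pass is the same as restarting from orig
theorem myIt2Go_nil (orig : List Int) (h : orig ≠ []) (fuel : Nat) (acc : List Int) :
    myIt2Go orig [] fuel acc = myIt2Go orig orig fuel acc := by
  cases fuel with
  | zero => cases orig with | nil => rfl | cons a t => rfl
  | succ f =>
      cases orig with
      | nil => exact absurd rfl h
      | cons a t => rfl

-- consuming a whole pass appends it to the accumulator and restarts
theorem myIt2Go_pass (orig : List Int) (h : orig ≠ []) :
    ∀ (rest : List Int) (m : Nat) (acc : List Int),
      myIt2Go orig rest (rest.length + m) acc = myIt2Go orig orig m (acc ++ rest) := by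
  intro rest
  induction rest with
  | nil => intro m acc; simpa using myIt2Go_nil orig h m acc
  | cons a t ih =>
      intro m acc
      have : (a :: t).length + m = (t.length + m) + 1 := by simp [List.length_cons]; omega
      rw [this]
      show myIt2Go orig t (t.length + m) (acc ++ [a]) = _
      rw [ih]
      simp

-- with fuel ≤ remaining pass, the loop appends a prefix of rest
theorem myIt2Go_take (orig : List Int) :
    ∀ (r : Nat) (rest : List Int) (acc : List Int), r ≤ rest.length →
      myIt2Go orig rest r acc = acc ++ rest.take r := by
  intro r
  induction r with
  | zero => intro rest acc _; simp [myIt2Go]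
  | succ k ih =>
      intro rest acc hle
      cases rest with
      | nil => simp at hle
      | cons a t =>
          show myIt2Go orig t k (acc ++ [a]) = _
          rw [ih t (acc ++ [a]) (by simpa using hle)]
          simp

-- full characterisation: q whole copies then r leftover elements
theorem myIt2Go_blocks (orig : List Int) (h : orig ≠ []) :
    ∀ (q r : Nat), r ≤ orig.length →
      myIt2Go orig orig (q * orig.length + r) [] =
        (List.replicate q orig).flatten ++ orig.take r := by
  intro q
  induction q with
  | zero => intro r hr; simpa using myIt2Go_take orig r orig [] hr
  | succ k ih =>
      intro r hr
      have : (k + 1) * orig.length + r = orig.length + (k * orig.length + r) := by ring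
      rw [this, myIt2Go_pass orig h orig (k * orig.length + r) []]
      have hacc : ∀ m acc, myIt2Go orig orig m acc = acc ++ myIt2Go orig orig m [] := by
        intro m
        induction m using Nat.strong_induction_on with
        | _ m ihm =>
            intro acc
            cases m with
            | zero => simp [myIt2Go]
            | succ f =>
                cases orig with
                | nil => exact absurd rfl h
                | cons a t =>
                    show myIt2Go (a :: t) t f (acc ++ [a]) = acc ++ myIt2Go (a :: t) t f [a]
                    rcases Nat.le_total f t.length with hle | hgt
                    · rw [myIt2Go_take _ f t _ hle, myIt2Go_take _ f t _ hle]; simp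
                    · obtain ⟨m', rfl⟩ : ∃ m', f = t.length + m' :=
                        ⟨f - t.length, by omega⟩
                      rw [myIt2Go_pass (a :: t) h t m' (acc ++ [a]),
                          myIt2Go_pass (a :: t) h t m' [a],
                          ihm m' (by omega) (acc ++ [a] ++ t),
                          ihm m' (by omega) ([a] ++ t)]
                      simp
      rw [hacc, ih r hr]
      simp [List.replicate_succ]

-- ===== VERDICT (by name: the statement is the Claim_ definition above) =====
theorem my_iterator_2_spec : Claim_equal_my_iterator_2 := by
  intro list_ num _
  show my_iterator_2 list_ num = my_iterator_2_alt list_ num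
  unfold my_iterator_2 my_iterator_2_alt
  by_cases hz : num + 1 ≤ 0 ∨ list_ = []
  · rw [if_pos hz]
    rcases hz with hz | hz
    · have : (num + 1).toNat = 0 := by omega
      rw [this]; cases list_ <;> rfl
    · subst hz
      cases (num + 1).toNat <;> rfl
  · rw [if_neg hz]
    have hpos : 0 < num + 1 := by
      by_contra hc; exact hz (Or.inl (by omega))
    have hne : list_ ≠ [] := fun hc => hz (Or.inr hc)
    have hlen : 0 < (list_.length : Int) := by
      have : list_.length ≠ 0 := by simpa using hne
      omega
    set n : Nat := (num + 1).toNat with hn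
    have hncast : ((n : Int)) = num + 1 := by omega
    have hq : PySem.Int.floordiv (num + 1) (list_.length : Int) =
        ((n / list_.length : Nat) : Int) := by
      rw [← hncast]; exact_mod_cast PySem.Int.floordiv_natCast n list_.length
    have hr : PySem.Int.mod (num + 1) (list_.length : Int) =
        ((n % list_.length : Nat) : Int) := by
      rw [← hncast]; exact_mod_cast PySem.Int.mod_natCast n list_.length
    simp only [hq, hr]
    rw [PySem.List.slice_to_natCast]
    have hq' : ((n / list_.length : Nat) : Int).toNat = n / list_.length := Int.toNat_natCast _
    rw [hq']
    have hlen' : 0 < list_.length := List.length_pos_iff.mpr hne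
    have hdecomp : n = (n / list_.length) * list_.length + n % list_.length := by
      rw [Nat.mul_comm]
      exact (Nat.div_add_mod n list_.length).symm
    calc myIt2Go list_ list_ n []
        = myIt2Go list_ list_ ((n / list_.length) * list_.length + n % list_.length) [] := by
          rw [← hdecomp]
      _ = (List.replicate (n / list_.length) list_).flatten ++ list_.take (n % list_.length) :=
          myIt2Go_blocks list_ hne _ _ (Nat.le_of_lt (Nat.mod_lt n hlen'))
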